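-- pv_equiv track=rewrite | github.com/Nama21yo/Natnael_CP | H_Hamburgers.py | solve
-- ===== SOURCE A (Python) =====
-- def can_prepare(mid, burger_type, nb, ns,nc,pb, ps, pc, money):
--     # count the bread, sausage and cheese needed
--     count_b = burger_type.count("B")
--     count_s = burger_type.count("S")
--     count_c = burger_type.count("C")
--     # neeeded  B,S,C for that hamburger
--     for_b = mid*count_b
--     for_s = mid*count_s
--     for_c = mid*count_c
--     # count extra needed price
--     extra_price = 0
--     extra_price += max((for_b - nb), 0) * pb # the extra bread price
--     extra_price += max((for_s - ns), 0) * ps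
--     # make max 0 for not making it -ve
--     # >> it means we already have enough ingredients, so the extra price should not decrease our total money.
--     extra_price += max((for_c - nc), 0) * pc
--     return extra_price <= money # the extra price should be at most my money I have
--
-- def solve(burger_type, nb, ns,nc,pb, ps, pc, money):
--     l  = - 1
--     r = int(1e15) + 1
--     # maximize hamburger
--     # TTTTTTTTT T FFFFFFF pattern
--     while r - l > 1:
--         mid = l + (r - l)//2
--         if can_prepare(mid, burger_type, nb, ns,nc,pb, ps, pc, money):
--             l = mid
--         else:
--             r = mid
--     return l # can prepare l hamburgers
-- ===== SOURCE B (Python) =====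
-- def solve(burger_type, nb, ns, nc, pb, ps, pc, money):
--     cap = 10 ** 15
--     items = [(burger_type.count("B"), nb, pb),
--              (burger_type.count("S"), ns, ps),
--              (burger_type.count("C"), nc, pc)]
--
--     def cost(k):
--         return sum(max(k * c - n, 0) * p for c, n, p in items)
--
--     # cost is linear between consecutive run-out points; walk those segments
--     starts = {0}
--     for c, n, p in items:
--         if c > 0:
--             starts.add(min(max(n // c + 1, 0), cap))
--     starts = sorted(starts)
--     ans = -1
--     for i, a in enumerate(starts):
--         b = starts[i + 1] - 1 if i + 1 < len(starts) else cap
--         ca = cost(a)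
--         if ca > money:
--             break  # cost only grows from here on
--         if a == b:
--             ans = a
--         else:
--             slope = cost(a + 1) - ca
--             ans = b if slope == 0 else min(b, a + (money - ca) // slope)
--     return ans
-- ===== Notes on version B (the rewrite author's own statement) =====
-- stated objective: faster
-- what changed: Replaces the ~50-iteration binary search over [-1, 1e15] with a direct walk of the at-most-4 linear phases of the cost function (delimited by the points where ingredients run out), solving each phase's linear inequality arithmetically; Pre_ excludes inputs where a used ingredient has a negative price, since there the cost is not monotone and A's binary-search result is an accident of its probe sequence.
-- outside the precondition, e.g. on solve('B', 0, 0, 0, -1, 0, 0, 0): A returns 1000000000000000, B returns 0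
import Mathlib
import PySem

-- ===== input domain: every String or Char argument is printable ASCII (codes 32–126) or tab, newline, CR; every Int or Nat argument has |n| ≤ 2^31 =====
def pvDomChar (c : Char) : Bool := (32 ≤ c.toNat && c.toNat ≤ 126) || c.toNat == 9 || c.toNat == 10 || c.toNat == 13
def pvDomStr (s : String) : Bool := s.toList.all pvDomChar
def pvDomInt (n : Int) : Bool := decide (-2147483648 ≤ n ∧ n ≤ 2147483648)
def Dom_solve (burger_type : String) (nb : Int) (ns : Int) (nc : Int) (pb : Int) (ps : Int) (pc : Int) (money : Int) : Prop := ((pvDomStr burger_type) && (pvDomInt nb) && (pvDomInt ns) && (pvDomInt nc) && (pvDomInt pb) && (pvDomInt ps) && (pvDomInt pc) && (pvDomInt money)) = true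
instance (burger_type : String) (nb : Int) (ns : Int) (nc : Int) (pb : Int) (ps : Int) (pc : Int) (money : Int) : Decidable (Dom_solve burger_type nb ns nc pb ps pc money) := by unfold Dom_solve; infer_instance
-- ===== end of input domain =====

-- B replaces A's binary search over [-1, 1e15] by a direct walk of the (at most 4)
-- linear phases of the cost function, solving each phase arithmetically; equivalence
-- is proved on Pre_solve (used ingredients have nonnegative prices).


-- ===== PORT A =====
def can_prepare (mid : Int) (burger_type : String) (nb : Int) (ns : Int) (nc : Int) (pb : Int) (ps : Int) (pc : Int) (money : Int) : Bool :=
  let count_b : Int := (PySem.Str.count burger_type "B" : Int)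
  let count_s : Int := (PySem.Str.count burger_type "S" : Int)
  let count_c : Int := (PySem.Str.count burger_type "C" : Int)
  let for_b := mid * count_b
  let for_s := mid * count_s
  let for_c := mid * count_c
  let extra_price : Int := 0
  let extra_price := extra_price + max (for_b - nb) 0 * pb
  let extra_price := extra_price + max (for_s - ns) 0 * ps
  let extra_price := extra_price + max (for_c - nc) 0 * pc
  decide (extra_price ≤ money)

def bsLoop (pred : Int → Bool) (l : Int) (r : Int) : Int :=
  if _h : r - l > 1 then
    let mid := l + PySem.Int.floordiv (r - l) 2
    if pred mid then bsLoop pred mid r else bsLoop pred l mid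
  else l
termination_by (r - l).toNat
decreasing_by
  all_goals
    rw [PySem.Int.floordiv_eq_ediv_of_pos (by omega : (0:Int) < 2)]
    omega

def solve (burger_type : String) (nb : Int) (ns : Int) (nc : Int) (pb : Int) (ps : Int) (pc : Int) (money : Int) : Int :=
  bsLoop (fun mid => can_prepare mid burger_type nb ns nc pb ps pc money) (-1) (1000000000000000 + 1)

-- ===== PORT B =====
def altCost (items : List (Int × Int × Int)) (k : Int) : Int :=
  (items.map (fun e => max (k * e.1 - e.2.1) 0 * e.2.2)).sum

def segLoop (items : List (Int × Int × Int)) (money : Int) (cap : Int) : List Int → Int → Int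
  | [], ans => ans
  | a :: rest, ans =>
    let b := match rest with
      | [] => cap
      | x :: _ => x - 1
    let ca := altCost items a
    if money < ca then ans
    else if a = b then segLoop items money cap rest a
    else
      let slope := altCost items (a + 1) - ca
      segLoop items money cap rest (if slope = 0 then b else min b (a + PySem.Int.floordiv (money - ca) slope))

def solve_alt (burger_type : String) (nb : Int) (ns : Int) (nc : Int) (pb : Int) (ps : Int) (pc : Int) (money : Int) : Int :=
  let cap : Int := 1000000000000000
  let items : List (Int × Int × Int) :=
    [((PySem.Str.count burger_type "B" : Int), nb, pb),
     ((PySem.Str.count burger_type "S" : Int), ns, ps),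
     ((PySem.Str.count burger_type "C" : Int), nc, pc)]
  let starts : PySem.Set Int := items.foldl
    (fun s e => if 0 < e.1 then PySem.Set.add s (min (max (PySem.Int.floordiv e.2.1 e.1 + 1) 0) cap) else s)
    (PySem.Set.ofList [0])
  segLoop items money cap (PySem.List.sorted starts (fun x => x) false) (-1)

-- ===== PRECONDITION & SPEC =====
-- Pre_ restricts to the task's natural domain: every ingredient the recipe uses has a
-- nonnegative price; with a negative price of a used ingredient the extra-cost
-- predicate is not monotone and A's binary-search result is an accident of the probe
-- sequence (see cites for an excluded input where A returns).
def Pre_solve (burger_type : String) (nb : Int) (ns : Int) (nc : Int) (pb : Int) (ps : Int) (pc : Int) (money : Int) : Prop :=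
  (0 < PySem.Str.count burger_type "B" → 0 ≤ pb) ∧
  (0 < PySem.Str.count burger_type "S" → 0 ≤ ps) ∧
  (0 < PySem.Str.count burger_type "C" → 0 ≤ pc)
instance (burger_type : String) (nb : Int) (ns : Int) (nc : Int) (pb : Int) (ps : Int) (pc : Int) (money : Int) : Decidable (Pre_solve burger_type nb ns nc pb ps pc money) := by unfold Pre_solve; infer_instance

def pvWitness_solve : String × Int × Int × Int × Int × Int × Int × Int := ("BSSC", 2, 1, 1, 3, 2, 5, 100)

def Spec_solve (burger_type : String) (nb : Int) (ns : Int) (nc : Int) (pb : Int) (ps : Int) (pc : Int) (money : Int) (out : Int) : Prop := out = solve_alt burger_type nb ns nc pb ps pc money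
instance (burger_type : String) (nb : Int) (ns : Int) (nc : Int) (pb : Int) (ps : Int) (pc : Int) (money : Int) (out : Int) : Decidable (Spec_solve burger_type nb ns nc pb ps pc money out) := by unfold Spec_solve; infer_instance

-- ===== CLAIM (what is proved, stated in full; the proofs are below) =====
def Claim_equal_solve : Prop := ∀ (burger_type : String) (nb : Int) (ns : Int) (nc : Int) (pb : Int) (ps : Int) (pc : Int) (money : Int), Dom_solve burger_type nb ns nc pb ps pc money → Pre_solve burger_type nb ns nc pb ps pc money → Spec_solve burger_type nb ns nc pb ps pc money (solve burger_type nb ns nc pb ps pc money)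

-- ===== LEMMAS AND PROOFS =====

-- the extra cost of k burgers, as both programs compute it
def pvCost (cb cs cc nb ns nc pb ps pc k : Int) : Int :=
  max (k * cb - nb) 0 * pb + max (k * cs - ns) 0 * ps + max (k * cc - nc) 0 * pc

-- cost is nondecreasing when every used ingredient has a nonnegative price
lemma pvCost_mono (cb cs cc nb ns nc pb ps pc : Int)
    (hcb : 0 ≤ cb) (hcs : 0 ≤ cs) (hcc : 0 ≤ cc)
    (hpb : 0 < cb → 0 ≤ pb) (hps : 0 < cs → 0 ≤ ps) (hpc : 0 < cc → 0 ≤ pc)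
    {k k' : Int} (h : k ≤ k') :
    pvCost cb cs cc nb ns nc pb ps pc k ≤ pvCost cb cs cc nb ns nc pb ps pc k' := by
  unfold pvCost
  have tB : max (k * cb - nb) 0 * pb ≤ max (k' * cb - nb) 0 * pb := by
    rcases lt_or_eq_of_le hcb with h0 | h0
    · have hm : k * cb ≤ k' * cb := mul_le_mul_of_nonneg_right h hcb
      exact mul_le_mul_of_nonneg_right (by omega) (hpb h0)
    · rw [← h0]; simp
  have tS : max (k * cs - ns) 0 * ps ≤ max (k' * cs - ns) 0 * ps := by
    rcases lt_or_eq_of_le hcs with h0 | h0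
    · have hm : k * cs ≤ k' * cs := mul_le_mul_of_nonneg_right h hcs
      exact mul_le_mul_of_nonneg_right (by omega) (hps h0)
    · rw [← h0]; simp
  have tC : max (k * cc - nc) 0 * pc ≤ max (k' * cc - nc) 0 * pc := by
    rcases lt_or_eq_of_le hcc with h0 | h0
    · have hm : k * cc ≤ k' * cc := mul_le_mul_of_nonneg_right h hcc
      exact mul_le_mul_of_nonneg_right (by omega) (hpc h0)
    · rw [← h0]; simp
  omega

-- binary-search characterisation: result is in [l, r) and is a boundary point
lemma bsLoop_spec (pred : Int → Bool) :
    ∀ (n : Nat) (l r : Int), (r - l).toNat ≤ n → l < r →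
      (pred l = true ∨ l = -1) → (pred r = false ∨ r = 1000000000000001) →
      l ≤ bsLoop pred l r ∧ bsLoop pred l r < r ∧
      (pred (bsLoop pred l r) = true ∨ bsLoop pred l r = -1) ∧
      (pred (bsLoop pred l r + 1) = false ∨ bsLoop pred l r + 1 = 1000000000000001) := by
  intro n
  induction n with
  | zero =>
    intro l r hn hlr _ _
    omega
  | succ n ih =>
    intro l r hn hlr hl hr
    rw [bsLoop]
    by_cases h : r - l > 1
    · rw [dif_pos h]
      have hfd : PySem.Int.floordiv (r - l) 2 = (r - l) / 2 :=
        PySem.Int.floordiv_eq_ediv_of_pos (by omega)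
      set mid := l + PySem.Int.floordiv (r - l) 2 with hmid
      have hmb : l < mid ∧ mid < r := by rw [hmid, hfd]; omega
      by_cases hp : pred mid = true
      · rw [if_pos hp]
        have := ih mid r (by rw [hfd] at hmid; omega) hmb.2 (Or.inl hp) hr
        exact ⟨by omega, this.2.1, this.2.2.1, this.2.2.2⟩
      · rw [if_neg hp]
        have hp' : pred mid = false := by
          cases hpm : pred mid
          · rfl
          · exact absurd hpm hp
        have := ih l mid (by rw [hfd] at hmid; omega) hmb.1 hl (Or.inl hp')
        exact ⟨this.1, by omega, this.2.2.1, this.2.2.2⟩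
    · rw [dif_neg h]
      have : r = l + 1 := by omega
      refine ⟨le_refl l, by omega, hl, ?_⟩
      rw [← this]; exact hr

-- uniqueness of the boundary point for a monotone predicate
lemma boundary_uniq (pred : Int → Bool)
    (hmono : ∀ a b : Int, a ≤ b → pred b = true → pred a = true)
    (k1 k2 : Int)
    (h1a : -1 ≤ k1) (h1b : k1 ≤ 1000000000000000)
    (h2a : -1 ≤ k2) (h2b : k2 ≤ 1000000000000000)
    (h1f : pred k1 = true ∨ k1 = -1) (h1t : pred (k1 + 1) = false ∨ k1 = 1000000000000000)
    (h2f : pred k2 = true ∨ k2 = -1) (h2t : pred (k2 + 1) = false ∨ k2 = 1000000000000000) :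
    k1 = k2 := by
  rcases lt_trichotomy k1 k2 with h | h | h
  · have hk2 : pred k2 = true := by
      rcases h2f with h' | h'
      · exact h'
      · omega
    have hk1 : pred (k1 + 1) = false := by
      rcases h1t with h' | h'
      · exact h'
      · omega
    have := hmono (k1 + 1) k2 (by omega) hk2
    rw [hk1] at this; exact absurd this (by simp)
  · exact h
  · have hk1 : pred k1 = true := by
      rcases h1f with h' | h'
      · exact h'
      · omega
    have hk2 : pred (k2 + 1) = false := by
      rcases h2t with h' | h'
      · exact h'
      · omega
    have := hmono (k2 + 1) k1 (by omega) hk1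
    rw [hk2] at this; exact absurd this (by simp)

-- B's cost on the literal three-item list is pvCost
lemma altCost_eq (cb cs cc nb ns nc pb ps pc k : Int) :
    altCost [(cb, nb, pb), (cs, ns, ps), (cc, nc, pc)] k = pvCost cb cs cc nb ns nc pb ps pc k := by
  simp [altCost, pvCost]; ring

-- on a phase [a, b] containing no run-out point, each cost term is a fixed linear function
lemma term_seg (c n p a b k : Int) (hc : 0 ≤ c)
    (hna : 0 < c → ¬(a < PySem.Int.floordiv n c + 1 ∧ PySem.Int.floordiv n c + 1 ≤ b))
    (hak : a ≤ k) (hkb : k ≤ b) :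
    max (k * c - n) 0 * p = (if 0 < a * c - n then (k * c - n) * p else 0) := by
  rcases lt_or_eq_of_le hc with h0 | h0
  · have hiff : ∀ m : Int, (0 < m * c - n ↔ PySem.Int.floordiv n c + 1 ≤ m) := by
      intro m
      rw [PySem.Int.floordiv_eq_ediv_of_pos h0]
      rw [show (0 < m * c - n ↔ n < m * c) from by omega]
      rw [show (n / c + 1 ≤ m ↔ n / c < m) from by omega]
      exact (Int.ediv_lt_iff_lt_mul h0).symm
    by_cases hta : PySem.Int.floordiv n c + 1 ≤ a
    · have hk : 0 < k * c - n := (hiff k).mpr (le_trans hta hak)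
      have ha : 0 < a * c - n := (hiff a).mpr hta
      rw [if_pos ha, show max (k * c - n) 0 = k * c - n from by omega]
    · have htb : ¬ PySem.Int.floordiv n c + 1 ≤ b := fun hb => (hna h0) ⟨by omega, hb⟩
      have hk : ¬ 0 < k * c - n := fun hx => htb (le_trans ((hiff k).mp hx) hkb)
      have ha : ¬ 0 < a * c - n := fun hx => hta ((hiff a).mp hx)
      rw [if_neg ha, show max (k * c - n) 0 = 0 from by omega, zero_mul]
  · rw [← h0]
    simp only [mul_zero, zero_sub]
    split_ifs with h
    · rw [show max (-n) 0 = -n from by omega]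
    · rw [show max (-n) 0 = 0 from by omega, zero_mul]

-- the phase slope
def pvSlope (cb cs cc nb ns nc pb ps pc a : Int) : Int :=
  (if 0 < a * cb - nb then cb * pb else 0) + (if 0 < a * cs - ns then cs * ps else 0) +
    (if 0 < a * cc - nc then cc * pc else 0)

-- cost is affine on a run-out-free phase
lemma cost_seg (cb cs cc nb ns nc pb ps pc a b : Int)
    (hcb : 0 ≤ cb) (hcs : 0 ≤ cs) (hcc : 0 ≤ cc)
    (hnaB : 0 < cb → ¬(a < PySem.Int.floordiv nb cb + 1 ∧ PySem.Int.floordiv nb cb + 1 ≤ b))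
    (hnaS : 0 < cs → ¬(a < PySem.Int.floordiv ns cs + 1 ∧ PySem.Int.floordiv ns cs + 1 ≤ b))
    (hnaC : 0 < cc → ¬(a < PySem.Int.floordiv nc cc + 1 ∧ PySem.Int.floordiv nc cc + 1 ≤ b))
    (k : Int) (hak : a ≤ k) (hkb : k ≤ b) :
    pvCost cb cs cc nb ns nc pb ps pc k =
      pvCost cb cs cc nb ns nc pb ps pc a + (k - a) * pvSlope cb cs cc nb ns nc pb ps pc a := by
  unfold pvCost pvSlope
  rw [term_seg cb nb pb a b k hcb hnaB hak hkb, term_seg cs ns ps a b k hcs hnaS hak hkb,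
      term_seg cc nc pc a b k hcc hnaC hak hkb,
      term_seg cb nb pb a b a hcb hnaB le_rfl (le_trans hak hkb),
      term_seg cs ns ps a b a hcs hnaS le_rfl (le_trans hak hkb),
      term_seg cc nc pc a b a hcc hnaC le_rfl (le_trans hak hkb)]
  split_ifs <;> ring

lemma pvSlope_nonneg (cb cs cc nb ns nc pb ps pc a : Int)
    (hcb : 0 ≤ cb) (hcs : 0 ≤ cs) (hcc : 0 ≤ cc)
    (hpb : 0 < cb → 0 ≤ pb) (hps : 0 < cs → 0 ≤ ps) (hpc : 0 < cc → 0 ≤ pc) :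
    0 ≤ pvSlope cb cs cc nb ns nc pb ps pc a := by
  unfold pvSlope
  have tB : (0:Int) ≤ (if 0 < a * cb - nb then cb * pb else 0) := by
    split_ifs with h
    · rcases lt_or_eq_of_le hcb with h0 | h0
      · exact mul_nonneg (le_of_lt h0) (hpb h0)
      · rw [← h0]; simp
    · exact le_rfl
  have tS : (0:Int) ≤ (if 0 < a * cs - ns then cs * ps else 0) := by
    split_ifs with h
    · rcases lt_or_eq_of_le hcs with h0 | h0
      · exact mul_nonneg (le_of_lt h0) (hps h0)
      · rw [← h0]; simp
    · exact le_rfl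
  have tC : (0:Int) ≤ (if 0 < a * cc - nc then cc * pc else 0) := by
    split_ifs with h
    · rcases lt_or_eq_of_le hcc with h0 | h0
      · exact mul_nonneg (le_of_lt h0) (hpc h0)
      · rw [← h0]; simp
    · exact le_rfl
  omega

-- maximal feasible point within one phase, as B computes it
def pvSegAns (cb cs cc nb ns nc pb ps pc money a b : Int) : Int :=
  if a = b then a else
    (if pvCost cb cs cc nb ns nc pb ps pc (a + 1) - pvCost cb cs cc nb ns nc pb ps pc a = 0 then b
     else min b (a + PySem.Int.floordiv (money - pvCost cb cs cc nb ns nc pb ps pc a)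
        (pvCost cb cs cc nb ns nc pb ps pc (a + 1) - pvCost cb cs cc nb ns nc pb ps pc a)))

lemma seg_max (cb cs cc nb ns nc pb ps pc money a b : Int)
    (hcb : 0 ≤ cb) (hcs : 0 ≤ cs) (hcc : 0 ≤ cc)
    (hpb : 0 < cb → 0 ≤ pb) (hps : 0 < cs → 0 ≤ ps) (hpc : 0 < cc → 0 ≤ pc)
    (hnaB : 0 < cb → ¬(a < PySem.Int.floordiv nb cb + 1 ∧ PySem.Int.floordiv nb cb + 1 ≤ b))
    (hnaS : 0 < cs → ¬(a < PySem.Int.floordiv ns cs + 1 ∧ PySem.Int.floordiv ns cs + 1 ≤ b))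
    (hnaC : 0 < cc → ¬(a < PySem.Int.floordiv nc cc + 1 ∧ PySem.Int.floordiv nc cc + 1 ≤ b))
    (hab : a ≤ b) (hfa : pvCost cb cs cc nb ns nc pb ps pc a ≤ money) :
    a ≤ pvSegAns cb cs cc nb ns nc pb ps pc money a b ∧
    pvSegAns cb cs cc nb ns nc pb ps pc money a b ≤ b ∧
    pvCost cb cs cc nb ns nc pb ps pc (pvSegAns cb cs cc nb ns nc pb ps pc money a b) ≤ money ∧
      (∀ k, pvSegAns cb cs cc nb ns nc pb ps pc money a b < k → k ≤ b →
        ¬ pvCost cb cs cc nb ns nc pb ps pc k ≤ money) := by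
  have hlin : ∀ k, a ≤ k → k ≤ b → pvCost cb cs cc nb ns nc pb ps pc k =
      pvCost cb cs cc nb ns nc pb ps pc a + (k - a) * pvSlope cb cs cc nb ns nc pb ps pc a :=
    fun k h1 h2 => cost_seg cb cs cc nb ns nc pb ps pc a b hcb hcs hcc hnaB hnaS hnaC k h1 h2
  have hS : 0 ≤ pvSlope cb cs cc nb ns nc pb ps pc a :=
    pvSlope_nonneg cb cs cc nb ns nc pb ps pc a hcb hcs hcc hpb hps hpc
  set ca := pvCost cb cs cc nb ns nc pb ps pc a with hca
  set S := pvSlope cb cs cc nb ns nc pb ps pc a with hSdef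
  unfold pvSegAns
  by_cases heq : a = b
  · rw [if_pos heq]
    exact ⟨le_rfl, le_of_eq heq, hfa, fun k h1 h2 => by omega⟩
  · rw [if_neg heq]
    have hab' : a < b := lt_of_le_of_ne hab heq
    have hslope : pvCost cb cs cc nb ns nc pb ps pc (a + 1) - ca = S := by
      rw [hlin (a + 1) (by omega) (by omega)]; ring
    rw [hslope]
    by_cases hs0 : S = 0
    · rw [if_pos hs0]
      refine ⟨hab, le_rfl, ?_, fun k h1 h2 => by omega⟩
      rw [hlin b hab le_rfl, hs0, mul_zero, add_zero]
      exact hfa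
    · rw [if_neg hs0]
      have hSpos : 0 < S := lt_of_le_of_ne hS (Ne.symm hs0)
      set q := PySem.Int.floordiv (money - ca) S with hq
      have hq0 : 0 ≤ q := by
        rw [hq]
        exact (PySem.Int.le_floordiv_iff_mul_le hSpos).mpr (by rw [zero_mul]; omega)
      have hqle : q * S ≤ money - ca := (PySem.Int.le_floordiv_iff_mul_le hSpos).mp (le_of_eq hq)
      have hqlt : money - ca < (q + 1) * S :=
        (PySem.Int.floordiv_lt_iff_lt_mul hSpos).mp (by omega)
      refine ⟨le_min (le_of_lt hab') (by omega), min_le_left _ _, ?_, ?_⟩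
      · rw [hlin (min b (a + q)) (le_min (le_of_lt hab') (by omega)) (min_le_left _ _)]
        have : (min b (a + q) - a) * S ≤ q * S :=
          mul_le_mul_of_nonneg_right (by omega) hS
        omega
      · intro k hk1 hk2
        rw [hlin k (by omega) hk2]
        have hka : q + 1 ≤ k - a := by omega
        have : (q + 1) * S ≤ (k - a) * S := mul_le_mul_of_nonneg_right hka hS
        omega

-- one step of the phase walk (b is the phase's last point, passed explicitly)
lemma segLoop_cons_aux (cb cs cc nb ns nc pb ps pc money : Int)
    (hcb : 0 ≤ cb) (hcs : 0 ≤ cs) (hcc : 0 ≤ cc)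
    (hpb : 0 < cb → 0 ≤ pb) (hps : 0 < cs → 0 ≤ ps) (hpc : 0 < cc → 0 ≤ pc)
    (a b : Int) (rest : List Int) (ans : Int)
    (IH : ∀ ans' : Int,
      rest.Pairwise (· < ·) →
      (∀ x ∈ rest, 0 ≤ x ∧ x ≤ 1000000000000000) →
      (0 < cb → min (max (PySem.Int.floordiv nb cb + 1) 0) 1000000000000000 ∈ rest ∨
                 min (max (PySem.Int.floordiv nb cb + 1) 0) 1000000000000000 ≤ ans') →
      (0 < cs → min (max (PySem.Int.floordiv ns cs + 1) 0) 1000000000000000 ∈ rest ∨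
                 min (max (PySem.Int.floordiv ns cs + 1) 0) 1000000000000000 ≤ ans') →
      (0 < cc → min (max (PySem.Int.floordiv nc cc + 1) 0) 1000000000000000 ∈ rest ∨
                 min (max (PySem.Int.floordiv nc cc + 1) 0) 1000000000000000 ≤ ans') →
      -1 ≤ ans' →
      (ans' = -1 ∨ pvCost cb cs cc nb ns nc pb ps pc ans' ≤ money) →
      (match rest with
       | [] => ans' ≤ 1000000000000000 ∧
           (ans' = 1000000000000000 ∨ ¬ pvCost cb cs cc nb ns nc pb ps pc (ans' + 1) ≤ money)
       | a :: _ => ans' < a ∧ ∀ k, ans' < k → k < a → ¬ pvCost cb cs cc nb ns nc pb ps pc k ≤ money) →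
      -1 ≤ segLoop [(cb, nb, pb), (cs, ns, ps), (cc, nc, pc)] money 1000000000000000 rest ans' ∧
      segLoop [(cb, nb, pb), (cs, ns, ps), (cc, nc, pc)] money 1000000000000000 rest ans' ≤ 1000000000000000 ∧
      (segLoop [(cb, nb, pb), (cs, ns, ps), (cc, nc, pc)] money 1000000000000000 rest ans' = -1 ∨
        pvCost cb cs cc nb ns nc pb ps pc (segLoop [(cb, nb, pb), (cs, ns, ps), (cc, nc, pc)] money 1000000000000000 rest ans') ≤ money) ∧
      (segLoop [(cb, nb, pb), (cs, ns, ps), (cc, nc, pc)] money 1000000000000000 rest ans' = 1000000000000000 ∨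
        ¬ pvCost cb cs cc nb ns nc pb ps pc (segLoop [(cb, nb, pb), (cs, ns, ps), (cc, nc, pc)] money 1000000000000000 rest ans' + 1) ≤ money))
    (hstep : segLoop [(cb, nb, pb), (cs, ns, ps), (cc, nc, pc)] money 1000000000000000 (a :: rest) ans =
      (if money < pvCost cb cs cc nb ns nc pb ps pc a then ans
       else if a = b then segLoop [(cb, nb, pb), (cs, ns, ps), (cc, nc, pc)] money 1000000000000000 rest a
       else
         segLoop [(cb, nb, pb), (cs, ns, ps), (cc, nc, pc)] money 1000000000000000 rest
           (if pvCost cb cs cc nb ns nc pb ps pc (a + 1) - pvCost cb cs cc nb ns nc pb ps pc a = 0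
            then b
            else min b (a + PySem.Int.floordiv (money - pvCost cb cs cc nb ns nc pb ps pc a)
              (pvCost cb cs cc nb ns nc pb ps pc (a + 1) - pvCost cb cs cc nb ns nc pb ps pc a)))))
    (hpw' : rest.Pairwise (· < ·))
    (hbd : ∀ x ∈ a :: rest, 0 ≤ x ∧ x ≤ 1000000000000000)
    (hclB : 0 < cb → min (max (PySem.Int.floordiv nb cb + 1) 0) 1000000000000000 ∈ a :: rest ∨
                 min (max (PySem.Int.floordiv nb cb + 1) 0) 1000000000000000 ≤ ans)
    (hclS : 0 < cs → min (max (PySem.Int.floordiv ns cs + 1) 0) 1000000000000000 ∈ a :: rest ∨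
                 min (max (PySem.Int.floordiv ns cs + 1) 0) 1000000000000000 ≤ ans)
    (hclC : 0 < cc → min (max (PySem.Int.floordiv nc cc + 1) 0) 1000000000000000 ∈ a :: rest ∨
                 min (max (PySem.Int.floordiv nc cc + 1) 0) 1000000000000000 ≤ ans)
    (hm1 : -1 ≤ ans)
    (hm2 : ans = -1 ∨ pvCost cb cs cc nb ns nc pb ps pc ans ≤ money)
    (hans_lt : ans < a)
    (hgap : ∀ k, ans < k → k < a → ¬ pvCost cb cs cc nb ns nc pb ps pc k ≤ money)
    (hab : a ≤ b) (hbcap : b ≤ 1000000000000000)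
    (hrest_ge : ∀ y ∈ rest, b + 1 ≤ y)
    (hrest_head : match rest with | [] => b = 1000000000000000 | x :: _ => x = b + 1) :
    -1 ≤ segLoop [(cb, nb, pb), (cs, ns, ps), (cc, nc, pc)] money 1000000000000000 (a :: rest) ans ∧
    segLoop [(cb, nb, pb), (cs, ns, ps), (cc, nc, pc)] money 1000000000000000 (a :: rest) ans ≤ 1000000000000000 ∧
    (segLoop [(cb, nb, pb), (cs, ns, ps), (cc, nc, pc)] money 1000000000000000 (a :: rest) ans = -1 ∨
      pvCost cb cs cc nb ns nc pb ps pc (segLoop [(cb, nb, pb), (cs, ns, ps), (cc, nc, pc)] money 1000000000000000 (a :: rest) ans) ≤ money) ∧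
    (segLoop [(cb, nb, pb), (cs, ns, ps), (cc, nc, pc)] money 1000000000000000 (a :: rest) ans = 1000000000000000 ∨
      ¬ pvCost cb cs cc nb ns nc pb ps pc (segLoop [(cb, nb, pb), (cs, ns, ps), (cc, nc, pc)] money 1000000000000000 (a :: rest) ans + 1) ≤ money) := by
  rw [hstep]
  have hba : 0 ≤ a ∧ a ≤ 1000000000000000 := hbd a (by simp)
  -- no run-out point strictly inside the phase
  have hna : ∀ (c n : Int), 0 < c →
      (min (max (PySem.Int.floordiv n c + 1) 0) 1000000000000000 ∈ a :: rest ∨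
        min (max (PySem.Int.floordiv n c + 1) 0) 1000000000000000 ≤ ans) →
      ¬(a < PySem.Int.floordiv n c + 1 ∧ PySem.Int.floordiv n c + 1 ≤ b) := by
    intro c n hc hcl ⟨hlt, hle⟩
    have hclip : min (max (PySem.Int.floordiv n c + 1) 0) 1000000000000000 =
        PySem.Int.floordiv n c + 1 := by omega
    rcases hcl with hin | hle'
    · rw [hclip] at hin
      rcases List.mem_cons.mp hin with hin | hin
      · omega
      · have := hrest_ge _ hin
        omega
    · omega
  by_cases hbreak : money < pvCost cb cs cc nb ns nc pb ps pc a
  · rw [if_pos hbreak]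
    refine ⟨hm1, by omega, hm2, Or.inr ?_⟩
    intro hcost
    rcases (by omega : ans + 1 = a ∨ ans + 1 < a) with h | h
    · rw [h] at hcost; omega
    · exact hgap (ans + 1) (by omega) h hcost
  · rw [if_neg hbreak]
    have hfa : pvCost cb cs cc nb ns nc pb ps pc a ≤ money := by omega
    have hseg := seg_max cb cs cc nb ns nc pb ps pc money a b hcb hcs hcc hpb hps hpc
      (fun h => hna cb nb h (hclB h)) (fun h => hna cs ns h (hclS h))
      (fun h => hna cc nc h (hclC h)) hab hfa
    set ans' := pvSegAns cb cs cc nb ns nc pb ps pc money a b with hans'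
    obtain ⟨hs1, hs2, hs3, hs4⟩ := hseg
    have hcall : (if a = b then
          segLoop [(cb, nb, pb), (cs, ns, ps), (cc, nc, pc)] money 1000000000000000 rest a
        else
          segLoop [(cb, nb, pb), (cs, ns, ps), (cc, nc, pc)] money 1000000000000000 rest
            (if pvCost cb cs cc nb ns nc pb ps pc (a + 1) - pvCost cb cs cc nb ns nc pb ps pc a = 0
             then b
             else min b (a + PySem.Int.floordiv (money - pvCost cb cs cc nb ns nc pb ps pc a)
               (pvCost cb cs cc nb ns nc pb ps pc (a + 1) - pvCost cb cs cc nb ns nc pb ps pc a)))) =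
        segLoop [(cb, nb, pb), (cs, ns, ps), (cc, nc, pc)] money 1000000000000000 rest ans' := by
      rw [hans']
      unfold pvSegAns
      split_ifs <;> rfl
    rw [hcall]
    have hcl' : ∀ (t : Int),
        (t ∈ a :: rest ∨ t ≤ ans) → (t ∈ rest ∨ t ≤ ans') := by
      intro t ht
      rcases ht with ht | ht
      · rcases List.mem_cons.mp ht with ht | ht
        · right; omega
        · left; exact ht
      · right; omega
    refine IH ans' hpw' (fun x hx => hbd x (by simp [hx])) ?_ ?_ ?_ (by omega) (Or.inr hs3) ?_
    · intro h; exact hcl' _ (hclB h)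
    · intro h; exact hcl' _ (hclS h)
    · intro h; exact hcl' _ (hclC h)
    · rcases hrest : rest with _ | ⟨x, rest'⟩
      · have hbc : b = 1000000000000000 := by rw [hrest] at hrest_head; exact hrest_head
        refine ⟨by omega, ?_⟩
        rcases (by omega : ans' = 1000000000000000 ∨ ans' + 1 ≤ b) with h | h
        · exact Or.inl h
        · exact Or.inr (hs4 (ans' + 1) (by omega) h)
      · have hx1 : x = b + 1 := by rw [hrest] at hrest_head; exact hrest_head
        refine ⟨by omega, ?_⟩
        intro k hk1 hk2
        exact hs4 k hk1 (by omega)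

-- the phase walk computes the boundary point
lemma segLoop_spec (cb cs cc nb ns nc pb ps pc money : Int)
    (hcb : 0 ≤ cb) (hcs : 0 ≤ cs) (hcc : 0 ≤ cc)
    (hpb : 0 < cb → 0 ≤ pb) (hps : 0 < cs → 0 ≤ ps) (hpc : 0 < cc → 0 ≤ pc) :
    ∀ (l : List Int) (ans : Int),
      l.Pairwise (· < ·) →
      (∀ x ∈ l, 0 ≤ x ∧ x ≤ 1000000000000000) →
      (0 < cb → min (max (PySem.Int.floordiv nb cb + 1) 0) 1000000000000000 ∈ l ∨
                 min (max (PySem.Int.floordiv nb cb + 1) 0) 1000000000000000 ≤ ans) →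
      (0 < cs → min (max (PySem.Int.floordiv ns cs + 1) 0) 1000000000000000 ∈ l ∨
                 min (max (PySem.Int.floordiv ns cs + 1) 0) 1000000000000000 ≤ ans) →
      (0 < cc → min (max (PySem.Int.floordiv nc cc + 1) 0) 1000000000000000 ∈ l ∨
                 min (max (PySem.Int.floordiv nc cc + 1) 0) 1000000000000000 ≤ ans) →
      -1 ≤ ans →
      (ans = -1 ∨ pvCost cb cs cc nb ns nc pb ps pc ans ≤ money) →
      (match l with
       | [] => ans ≤ 1000000000000000 ∧
           (ans = 1000000000000000 ∨ ¬ pvCost cb cs cc nb ns nc pb ps pc (ans + 1) ≤ money)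
       | a :: _ => ans < a ∧ ∀ k, ans < k → k < a → ¬ pvCost cb cs cc nb ns nc pb ps pc k ≤ money) →
      -1 ≤ segLoop [(cb, nb, pb), (cs, ns, ps), (cc, nc, pc)] money 1000000000000000 l ans ∧
      segLoop [(cb, nb, pb), (cs, ns, ps), (cc, nc, pc)] money 1000000000000000 l ans ≤ 1000000000000000 ∧
      (segLoop [(cb, nb, pb), (cs, ns, ps), (cc, nc, pc)] money 1000000000000000 l ans = -1 ∨
        pvCost cb cs cc nb ns nc pb ps pc (segLoop [(cb, nb, pb), (cs, ns, ps), (cc, nc, pc)] money 1000000000000000 l ans) ≤ money) ∧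
      (segLoop [(cb, nb, pb), (cs, ns, ps), (cc, nc, pc)] money 1000000000000000 l ans = 1000000000000000 ∨
        ¬ pvCost cb cs cc nb ns nc pb ps pc (segLoop [(cb, nb, pb), (cs, ns, ps), (cc, nc, pc)] money 1000000000000000 l ans + 1) ≤ money) := by
  intro l
  induction l with
  | nil =>
    intro ans _ _ _ _ _ hm1 hm2 hm3
    simp only [segLoop]
    exact ⟨hm1, hm3.1, hm2, hm3.2⟩
  | cons a rest ih =>
    intro ans hpw hbd hclB hclS hclC hm1 hm2 hm3
    obtain ⟨hrest_gt, hpw'⟩ := List.pairwise_cons.mp hpw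
    obtain ⟨hans_lt, hgap⟩ := hm3
    rcases hrest : rest with _ | ⟨x, rest'⟩
    · subst hrest
      exact segLoop_cons_aux cb cs cc nb ns nc pb ps pc money hcb hcs hcc hpb hps hpc
        a 1000000000000000 [] ans ih (by simp only [segLoop, altCost_eq]) hpw' hbd hclB hclS hclC
        hm1 hm2 hans_lt hgap (hbd a (by simp)).2 le_rfl (by simp) rfl
    · subst hrest
      have hax : a < x := hrest_gt x (by simp)
      have hxb : 0 ≤ x ∧ x ≤ 1000000000000000 := hbd x (by simp)
      refine segLoop_cons_aux cb cs cc nb ns nc pb ps pc money hcb hcs hcc hpb hps hpc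
        a (x - 1) (x :: rest') ans ih (by simp only [segLoop, altCost_eq]) hpw' hbd hclB hclS hclC
        hm1 hm2 hans_lt hgap (by omega) (by omega) ?_ (by omega)
      intro y hy
      rcases List.mem_cons.mp hy with hy | hy
      · omega
      · have := (List.pairwise_cons.mp hpw').1 y hy
        omega

-- membership and dedup facts about the fold that collects the clipped run-out points
lemma foldl_clipAdd_mem (cap : Int) (items : List (Int × Int × Int)) (s : List Int) (x : Int) :
    x ∈ items.foldl (fun s e => if 0 < e.1 then
        PySem.Set.add s (min (max (PySem.Int.floordiv e.2.1 e.1 + 1) 0) cap) else s) s ↔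
      x ∈ s ∨ ∃ e ∈ items, 0 < e.1 ∧ x = min (max (PySem.Int.floordiv e.2.1 e.1 + 1) 0) cap := by
  induction items generalizing s with
  | nil => simp
  | cons e rest ih =>
    simp only [List.foldl_cons]
    rw [ih]
    by_cases h : 0 < e.1
    · rw [if_pos h, PySem.Set.mem_add]
      simp only [List.mem_cons]
      constructor
      · rintro ((hx | hx) | ⟨e', he', h1, h2⟩)
        · exact Or.inl hx
        · exact Or.inr ⟨e, Or.inl rfl, h, hx⟩
        · exact Or.inr ⟨e', Or.inr he', h1, h2⟩
      · rintro (hx | ⟨e', (rfl | he'), h1, h2⟩)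
        · exact Or.inl (Or.inl hx)
        · exact Or.inl (Or.inr h2)
        · exact Or.inr ⟨e', he', h1, h2⟩
    · rw [if_neg h]
      simp only [List.mem_cons]
      constructor
      · rintro (hx | ⟨e', he', h1, h2⟩)
        · exact Or.inl hx
        · exact Or.inr ⟨e', Or.inr he', h1, h2⟩
      · rintro (hx | ⟨e', (rfl | he'), h1, h2⟩)
        · exact Or.inl hx
        · exact absurd h1 h
        · exact Or.inr ⟨e', he', h1, h2⟩

lemma foldl_clipAdd_nodup (cap : Int) (items : List (Int × Int × Int)) (s : List Int)
    (h : s.Nodup) :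
    (items.foldl (fun s e => if 0 < e.1 then
        PySem.Set.add s (min (max (PySem.Int.floordiv e.2.1 e.1 + 1) 0) cap) else s) s).Nodup := by
  induction items generalizing s with
  | nil => exact h
  | cons e rest ih =>
    simp only [List.foldl_cons]
    apply ih
    split
    · exact PySem.Set.nodup_add _ _ h
    · exact h

-- B's result is a boundary point of the feasibility predicate
lemma solveB_boundary (cb cs cc nb ns nc pb ps pc money R : Int)
    (hcb : 0 ≤ cb) (hcs : 0 ≤ cs) (hcc : 0 ≤ cc)
    (hpb : 0 < cb → 0 ≤ pb) (hps : 0 < cs → 0 ≤ ps) (hpc : 0 < cc → 0 ≤ pc)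
    (hR : R = segLoop [(cb, nb, pb), (cs, ns, ps), (cc, nc, pc)] money 1000000000000000
      (PySem.List.sorted (([(cb, nb, pb), (cs, ns, ps), (cc, nc, pc)] : List (Int × Int × Int)).foldl
        (fun s e => if 0 < e.1 then
          PySem.Set.add s (min (max (PySem.Int.floordiv e.2.1 e.1 + 1) 0) 1000000000000000) else s)
        (PySem.Set.ofList [0])) (fun x => x) false) (-1)) :
    -1 ≤ R ∧ R ≤ 1000000000000000 ∧
    (R = -1 ∨ pvCost cb cs cc nb ns nc pb ps pc R ≤ money) ∧
    (R = 1000000000000000 ∨ ¬ pvCost cb cs cc nb ns nc pb ps pc (R + 1) ≤ money) := by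
  set items : List (Int × Int × Int) := [(cb, nb, pb), (cs, ns, ps), (cc, nc, pc)] with hitems
  set S3 := items.foldl
    (fun s e => if 0 < e.1 then
      PySem.Set.add s (min (max (PySem.Int.floordiv e.2.1 e.1 + 1) 0) 1000000000000000) else s)
    (PySem.Set.ofList [0]) with hS3
  set L := PySem.List.sorted S3 (fun x => x) false with hLdef
  have hmemS3 : ∀ x, x ∈ S3 ↔ x ∈ PySem.Set.ofList [0] ∨
      ∃ e ∈ items, 0 < e.1 ∧ x = min (max (PySem.Int.floordiv e.2.1 e.1 + 1) 0) 1000000000000000 :=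
    fun x => foldl_clipAdd_mem 1000000000000000 items (PySem.Set.ofList [0]) x
  have h0S3 : (0 : Int) ∈ S3 := (hmemS3 0).mpr (Or.inl (by simp [PySem.Set.mem_ofList]))
  have hndS3 : S3.Nodup :=
    foldl_clipAdd_nodup 1000000000000000 items (PySem.Set.ofList [0]) (PySem.Set.nodup_ofList _)
  have hmemL : ∀ x, x ∈ L ↔ x ∈ S3 := fun x => PySem.List.mem_sorted S3 (fun x => x) false x
  have hLperm : L.Perm S3 := PySem.List.sorted_perm S3 (fun x => x) false
  have hLnodup : L.Nodup := hLperm.nodup_iff.mpr hndS3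
  have hLle : L.Pairwise (· ≤ ·) := by
    have := PySem.List.sorted_pairwise (xs := S3) (key := fun x => x)
    simpa using this
  have hLlt : L.Pairwise (· < ·) :=
    (List.Pairwise.and hLle hLnodup).imp fun h => lt_of_le_of_ne h.1 h.2
  have hbd : ∀ x ∈ L, 0 ≤ x ∧ x ≤ 1000000000000000 := by
    intro x hx
    rcases (hmemS3 x).mp ((hmemL x).mp hx) with h | ⟨e, _, _, h⟩
    · simp [PySem.Set.mem_ofList] at h
      omega
    · omega
  have hclip : ∀ (c n p : Int), (c, n, p) ∈ items → 0 < c →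
      min (max (PySem.Int.floordiv n c + 1) 0) 1000000000000000 ∈ L := by
    intro c n p he hc
    exact (hmemL _).mpr ((hmemS3 _).mpr (Or.inr ⟨(c, n, p), he, hc, rfl⟩))
  rcases hLcase : L with _ | ⟨a, rest⟩
  · exact absurd (hLcase ▸ (hmemL 0).mpr h0S3) (by simp)
  · have ha0 : a ≤ 0 := by
      have := PySem.List.key_head_sorted_le S3 (fun x => x) (hLdef.symm.trans hLcase) 0 h0S3
      simpa using this
    have hspec := segLoop_spec cb cs cc nb ns nc pb ps pc money hcb hcs hcc hpb hps hpc
      (a :: rest) (-1) (hLcase ▸ hLlt) (hLcase ▸ hbd)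
      (fun h => Or.inl (hLcase ▸ hclip cb nb pb (by rw [hitems]; simp) h))
      (fun h => Or.inl (hLcase ▸ hclip cs ns ps (by rw [hitems]; simp) h))
      (fun h => Or.inl (hLcase ▸ hclip cc nc pc (by rw [hitems]; simp) h))
      (by omega) (Or.inl rfl)
      ⟨by have := (hLcase ▸ hbd) a (by simp); omega, fun k h1 h2 => by omega⟩
    rw [hR, hLcase]
    exact hspec

-- ===== VERDICT (by name: the statement is the Claim_ definition above) =====
theorem solve_spec : Claim_equal_solve := by
  intro bt nb ns nc pb ps pc money hdom hpre
  obtain ⟨hq1, hq2, hq3⟩ := hpre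
  unfold Spec_solve
  have hcb : (0 : Int) ≤ (PySem.Str.count bt "B" : Int) := Int.natCast_nonneg _
  have hcs : (0 : Int) ≤ (PySem.Str.count bt "S" : Int) := Int.natCast_nonneg _
  have hcc : (0 : Int) ≤ (PySem.Str.count bt "C" : Int) := Int.natCast_nonneg _
  have hpb : (0 : Int) < (PySem.Str.count bt "B" : Int) → 0 ≤ pb := fun h => hq1 (by exact_mod_cast h)
  have hps : (0 : Int) < (PySem.Str.count bt "S" : Int) → 0 ≤ ps := fun h => hq2 (by exact_mod_cast h)
  have hpc : (0 : Int) < (PySem.Str.count bt "C" : Int) → 0 ≤ pc := fun h => hq3 (by exact_mod_cast h)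
  have hpred : ∀ k : Int, (can_prepare k bt nb ns nc pb ps pc money = true) ↔
      pvCost (PySem.Str.count bt "B" : Int) (PySem.Str.count bt "S" : Int)
        (PySem.Str.count bt "C" : Int) nb ns nc pb ps pc k ≤ money := by
    intro k
    simp only [can_prepare, pvCost, decide_eq_true_eq, zero_add]
  have hmono : ∀ a b : Int, a ≤ b →
      (can_prepare b bt nb ns nc pb ps pc money = true) →
      (can_prepare a bt nb ns nc pb ps pc money = true) := by
    intro a b hab hb
    rw [hpred] at hb ⊢
    exact le_trans (pvCost_mono _ _ _ _ _ _ _ _ _ hcb hcs hcc hpb hps hpc hab) hb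
  have hA := bsLoop_spec (fun k => can_prepare k bt nb ns nc pb ps pc money)
    1000000000000002 (-1) (1000000000000000 + 1) (by omega) (by omega)
    (Or.inr rfl) (Or.inr (by norm_num))
  obtain ⟨hA1, hA2, hA3, hA4⟩ := hA
  have hB := solveB_boundary (PySem.Str.count bt "B" : Int) (PySem.Str.count bt "S" : Int)
    (PySem.Str.count bt "C" : Int) nb ns nc pb ps pc money
    (solve_alt bt nb ns nc pb ps pc money) hcb hcs hcc hpb hps hpc rfl
  obtain ⟨hB1, hB2, hB3, hB4⟩ := hB
  have hsolve : solve bt nb ns nc pb ps pc money =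
      bsLoop (fun k => can_prepare k bt nb ns nc pb ps pc money) (-1) (1000000000000000 + 1) := rfl
  rw [hsolve]
  refine boundary_uniq (fun k => can_prepare k bt nb ns nc pb ps pc money) hmono _ _
    (by omega) (by omega) hB1 hB2 hA3 ?_ ?_ ?_
  · rcases hA4 with h | h
    · exact Or.inl h
    · right; omega
  · rcases hB3 with h | h
    · exact Or.inr h
    · exact Or.inl ((hpred _).mpr h)
  · rcases hB4 with h | h
    · exact Or.inr h
    · left
      cases hx : can_prepare (solve_alt bt nb ns nc pb ps pc money + 1) bt nb ns nc pb ps pc money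
      · exact hx
      · exact absurd ((hpred _).mp hx) h
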